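-- pv_equiv track=rewrite | github.com/fangzhao2019/system_code-version2 | data_ananlysis/chery/opinionMining.py | deepAnalysis
-- ===== SOURCE A (Python) =====
-- def deepAnalysis(f_index,index2,senword,degwordSet,notwordSet,clauseVecSet):
--     opinion=''
--     degword=''
--     notword=''
--     degIndex=0
--     notIndex=0
--     for x in range(f_index+1,index2):
--         if clauseVecSet[x][0] in degwordSet:
--             degword=clauseVecSet[x][0]
--             degIndex=x
--         if clauseVecSet[x][0] in notwordSet:
--             notword=clauseVecSet[x][0]
--             notIndex=x
--     if degIndex>notIndex:
--         opinion=notword+degword+senword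
--     if notIndex>=degIndex:
--         opinion=degword+notword+senword
--     return opinion
-- ===== SOURCE B (Python) =====
-- def deepAnalysis(f_index, index2, senword, degwordSet, notwordSet, clauseVecSet):
--     degword = ''
--     notword = ''
--     degIndex = 0
--     notIndex = 0
--     degFound = False
--     notFound = False
--     for x in range(index2 - 1, f_index, -1):
--         w = clauseVecSet[x][0]
--         if not degFound and w in degwordSet:
--             degword = w
--             degIndex = x
--             degFound = True
--         if not notFound and w in notwordSet:
--             notword = w
--             notIndex = x
--             notFound = True
--         if degFound and notFound:
--             break
--     if degIndex > notIndex: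
--         return notword + degword + senword
--     else:
--         return degword + notword + senword
-- ===== Notes on version B (the rewrite author's own statement) =====
-- stated objective: alternative
-- what changed: B replaces A's full forward pass that overwrites with every match (keeping the last occurrence) by a backward scan with two found-flags that records the first degree/negation word seen and breaks early once both are found.
import Mathlib
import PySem

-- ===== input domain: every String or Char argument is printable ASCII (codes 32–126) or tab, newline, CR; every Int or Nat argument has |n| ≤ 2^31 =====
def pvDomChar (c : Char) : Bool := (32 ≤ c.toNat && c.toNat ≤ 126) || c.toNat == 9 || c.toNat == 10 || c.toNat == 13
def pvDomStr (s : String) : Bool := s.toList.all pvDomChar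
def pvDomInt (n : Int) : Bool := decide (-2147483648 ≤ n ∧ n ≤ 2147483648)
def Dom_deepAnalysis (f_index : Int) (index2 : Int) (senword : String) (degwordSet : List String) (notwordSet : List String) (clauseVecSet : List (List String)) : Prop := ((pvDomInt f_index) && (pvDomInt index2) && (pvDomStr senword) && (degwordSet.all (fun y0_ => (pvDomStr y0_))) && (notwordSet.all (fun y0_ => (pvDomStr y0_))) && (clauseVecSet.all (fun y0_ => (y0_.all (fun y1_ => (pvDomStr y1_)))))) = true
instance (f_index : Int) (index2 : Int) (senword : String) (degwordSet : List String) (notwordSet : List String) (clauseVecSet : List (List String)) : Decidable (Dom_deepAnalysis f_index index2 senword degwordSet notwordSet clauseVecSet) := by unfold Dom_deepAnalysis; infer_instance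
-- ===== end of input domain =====

-- B replaces A's full forward last-occurrence pass by a backward first-occurrence scan with
-- found-flags and early break (objective: alternative); return values proved equal on Pre_.

-- ===== PORT A =====

structure DAState where
  dw : String
  di : Int
  nw : String
  ni : Int
deriving Repr, DecidableEq

-- clauseVecSet[x][0] : Python negative-index access, exact via pyGetD under Pre_ (both indices in range)
def word0 (cv : List (List String)) (x : Int) : String :=
  PySem.List.pyGetD (PySem.List.pyGetD cv x []) 0 ""

def stepA (degwordSet notwordSet : List String) (cv : List (List String)) (s : DAState) (x : Int) : DAState :=
  let w := word0 cv x
  let s := if degwordSet.contains w then { s with dw := w, di := x } else s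
  if notwordSet.contains w then { s with nw := w, ni := x } else s

def deepAnalysis (f_index : Int) (index2 : Int) (senword : String) (degwordSet : List String) (notwordSet : List String) (clauseVecSet : List (List String)) : String :=
  let s := (PySem.List.pyRange (f_index + 1) index2 1).foldl
             (stepA degwordSet notwordSet clauseVecSet) ⟨"", 0, "", 0⟩
  let opinion := ""
  let opinion := if s.di > s.ni then s.nw ++ s.dw ++ senword else opinion
  let opinion := if s.ni ≥ s.di then s.dw ++ s.nw ++ senword else opinion
  opinion

-- ===== PORT B =====

-- backward scan with found-flags; stops as soon as both a degree and a negation word were seen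
def scanB (degwordSet notwordSet : List String) (cv : List (List String)) :
    List Int → String → Int → Bool → String → Int → Bool → DAState
  | [], dw, di, _, nw, ni, _ => ⟨dw, di, nw, ni⟩
  | x :: rest, dw, di, df, nw, ni, nf =>
    let w := word0 cv x
    let d := if !df && degwordSet.contains w then (w, x, true) else (dw, di, df)
    let n := if !nf && notwordSet.contains w then (w, x, true) else (nw, ni, nf)
    if d.2.2 && n.2.2 then ⟨d.1, d.2.1, n.1, n.2.1⟩
    else scanB degwordSet notwordSet cv rest d.1 d.2.1 d.2.2 n.1 n.2.1 n.2.2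

def deepAnalysis_alt (f_index : Int) (index2 : Int) (senword : String) (degwordSet : List String) (notwordSet : List String) (clauseVecSet : List (List String)) : String :=
  let s := scanB degwordSet notwordSet clauseVecSet
             (PySem.List.pyRange (index2 - 1) f_index (-1)) "" 0 false "" 0 false
  if s.di > s.ni then s.nw ++ s.dw ++ senword
  else s.dw ++ s.nw ++ senword

-- ===== PRECONDITION & SPEC =====
-- Pre_ excludes exactly the inputs where Python A raises IndexError: some x in the scanned
-- range addresses a clause that is missing (index out of range, incl. negative wraparound) or
-- empty; the explicit bounds come first so deciding Pre_ never materialises a huge range.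
def Pre_deepAnalysis (f_index : Int) (index2 : Int) (senword : String) (degwordSet : List String) (notwordSet : List String) (clauseVecSet : List (List String)) : Prop :=
  index2 ≤ f_index + 1 ∨
    (-(clauseVecSet.length : Int) ≤ f_index + 1 ∧ index2 ≤ (clauseVecSet.length : Int) ∧
      ∀ x ∈ PySem.List.pyRange (f_index + 1) index2 1, PySem.List.pyGetD clauseVecSet x [] ≠ [])
instance (f_index : Int) (index2 : Int) (senword : String) (degwordSet : List String) (notwordSet : List String) (clauseVecSet : List (List String)) : Decidable (Pre_deepAnalysis f_index index2 senword degwordSet notwordSet clauseVecSet) := by unfold Pre_deepAnalysis; infer_instance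

def pvWitness_deepAnalysis : Int × Int × String × List String × List String × List (List String) :=
  (0, 3, "good", ["very"], ["not"], [["a"], ["not"], ["very"]])

def Spec_deepAnalysis (f_index : Int) (index2 : Int) (senword : String) (degwordSet : List String) (notwordSet : List String) (clauseVecSet : List (List String)) (out : String) : Prop := out = deepAnalysis_alt f_index index2 senword degwordSet notwordSet clauseVecSet
instance (f_index : Int) (index2 : Int) (senword : String) (degwordSet : List String) (notwordSet : List String) (clauseVecSet : List (List String)) (out : String) : Decidable (Spec_deepAnalysis f_index index2 senword degwordSet notwordSet clauseVecSet out) := by unfold Spec_deepAnalysis; infer_instance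

-- ===== CLAIM (what is proved, stated in full; the proofs are below) =====
def Claim_equal_deepAnalysis : Prop := ∀ (f_index : Int) (index2 : Int) (senword : String) (degwordSet : List String) (notwordSet : List String) (clauseVecSet : List (List String)), Dom_deepAnalysis f_index index2 senword degwordSet notwordSet clauseVecSet → Pre_deepAnalysis f_index index2 senword degwordSet notwordSet clauseVecSet → Spec_deepAnalysis f_index index2 senword degwordSet notwordSet clauseVecSet (deepAnalysis f_index index2 senword degwordSet notwordSet clauseVecSet)

-- ===== LEMMAS AND PROOFS =====

-- first index in l whose clause head lies in ws
def pick (ws : List String) (cv : List (List String)) (l : List Int) : Option Int :=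
  l.find? (fun x => ws.contains (word0 cv x))

def res (cv : List (List String)) (o : Option Int) (w : String) (i : Int) : String × Int :=
  match o with
  | some x => (word0 cv x, x)
  | none => (w, i)

lemma foldA_eq (deg nt : List String) (cv : List (List String)) (l : List Int) (s : DAState) :
    l.foldl (stepA deg nt cv) s =
      ⟨(res cv (pick deg cv l.reverse) s.dw s.di).1, (res cv (pick deg cv l.reverse) s.dw s.di).2,
       (res cv (pick nt cv l.reverse) s.nw s.ni).1, (res cv (pick nt cv l.reverse) s.nw s.ni).2⟩ := by
  induction l generalizing s with
  | nil => simp [pick, res]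
  | cons x l ih =>
    simp only [List.foldl_cons, ih, List.reverse_cons, pick, List.find?_append]
    cases hd : List.find? (fun x => deg.contains (word0 cv x)) l.reverse <;>
      cases hn : List.find? (fun x => nt.contains (word0 cv x)) l.reverse <;>
        simp [res, stepA, pick] <;> split_ifs <;> simp_all

lemma scanB_eq (deg nt : List String) (cv : List (List String)) (l : List Int)
    (dw : String) (di : Int) (df : Bool) (nw : String) (ni : Int) (nf : Bool) :
    scanB deg nt cv l dw di df nw ni nf =
      ⟨(if df then (dw, di) else res cv (pick deg cv l) dw di).1,
       (if df then (dw, di) else res cv (pick deg cv l) dw di).2,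
       (if nf then (nw, ni) else res cv (pick nt cv l) nw ni).1,
       (if nf then (nw, ni) else res cv (pick nt cv l) nw ni).2⟩ := by
  induction l generalizing dw di df nw ni nf with
  | nil => cases df <;> cases nf <;> simp [scanB, pick, res]
  | cons x l ih =>
    simp only [scanB, ih, pick, List.find?_cons]
    cases df <;> cases nf <;>
      by_cases hd : word0 cv x ∈ deg <;>
        by_cases hn : word0 cv x ∈ nt <;>
          simp [hd, hn, res]

theorem deepAnalysis_spec : Claim_equal_deepAnalysis := by
  intro f_index index2 senword deg nt cv _ _
  unfold Spec_deepAnalysis deepAnalysis deepAnalysis_alt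
  have hrange : PySem.List.pyRange (index2 - 1) f_index (-1) =
      (PySem.List.pyRange (f_index + 1) index2 1).reverse := by
    rw [PySem.List.pyRange_neg_one_eq_reverse]
    norm_num
  rw [hrange, scanB_eq,
    foldA_eq deg nt cv (PySem.List.pyRange (f_index + 1) index2 1) ⟨"", 0, "", 0⟩]
  cases hD : pick deg cv (PySem.List.pyRange (f_index + 1) index2 1).reverse <;>
    cases hN : pick nt cv (PySem.List.pyRange (f_index + 1) index2 1).reverse <;>
      simp only [res] <;> split_ifs <;> simp_all <;> omega
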